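-- pv_equiv track=rewrite | github.com/arequenai/Health-AR | analyses/test_stress_function.py | find_min_sustained_value
-- ===== SOURCE A (Python) =====
-- def find_min_sustained_value(values, consecutive_count=3):
--     """
--     Find the minimum value that was sustained for at least
--     consecutive_count consecutive measurements.
--
--     Args:
--         values: List of measurements (integers/floats)
--         consecutive_count: Minimum number of consecutive measurements
--
--     Returns:
--         float: Minimum sustained value or None if not found
--     """
--     if not values or len(values) < consecutive_count:
--         return None
--
--     # Sort values to organize by level
--     sorted_values = sorted(values)
--
--     # Start with the lowest value as a candidate
--     min_sustained = None
--
--     # Function to check if a value is sustained in the original sequence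
--     def is_sustained(threshold, orig_sequence, count):
--         longest_run = 0
--         current_run = 0
--
--         for val in orig_sequence:
--             if val <= threshold:
--                 current_run += 1
--                 longest_run = max(longest_run, current_run)
--             else:
--                 current_run = 0
--
--         return longest_run >= count
--
--     # Try each value as a potential threshold
--     unique_values = sorted(set(sorted_values))
--
--     for threshold in unique_values:
--         if is_sustained(threshold, values, consecutive_count):
--             min_sustained = threshold
--             break
--
--     return min_sustained
-- ===== SOURCE B (Python) =====
-- def find_min_sustained_value(values, consecutive_count=3):
--     """Minimum value sustained for >= consecutive_count consecutive measurements.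
--
--     One scan over the windows of length k = max(consecutive_count, 1):
--     a run of k consecutive values <= t exists iff some window's maximum
--     is <= t, so the answer is simply the smallest window maximum.
--     """
--     n = len(values)
--     if not values or n < consecutive_count:
--         return None
--     k = consecutive_count if consecutive_count > 1 else 1
--     best = None
--     for i in range(n - k + 1):
--         m = values[i]
--         for v in values[i + 1:i + k]:
--             if v > m:
--                 m = v
--         if best is None or m < best:
--             best = m
--     return best
-- ===== Notes on version B (the rewrite author's own statement) =====
-- stated objective: faster
-- what changed: A sorts the distinct values and rescans the whole sequence once per candidate threshold; B makes a single pass over the windows of length max(consecutive_count,1) and returns the smallest window maximum, with no sorting and no per-threshold rescans.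
import Mathlib
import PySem

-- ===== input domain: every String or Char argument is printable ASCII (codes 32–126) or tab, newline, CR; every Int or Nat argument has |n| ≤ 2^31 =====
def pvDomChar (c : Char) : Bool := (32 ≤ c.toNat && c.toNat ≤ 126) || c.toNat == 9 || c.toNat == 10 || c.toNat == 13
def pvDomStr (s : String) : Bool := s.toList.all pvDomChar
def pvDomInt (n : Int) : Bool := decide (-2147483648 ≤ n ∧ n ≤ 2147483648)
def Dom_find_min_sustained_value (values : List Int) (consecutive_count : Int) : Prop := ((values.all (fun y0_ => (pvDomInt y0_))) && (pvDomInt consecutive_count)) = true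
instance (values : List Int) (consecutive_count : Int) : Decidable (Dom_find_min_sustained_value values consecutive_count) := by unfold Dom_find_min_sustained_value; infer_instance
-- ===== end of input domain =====

-- B replaces A's per-threshold rescans of the whole sequence (one scan for each distinct
-- candidate value, after sorting) by a single pass over the length-k windows, returning the
-- smallest window maximum; a timing run measures it faster.

-- ===== PORT A =====
-- is_sustained's loop body: state = (longest_run, current_run)
def pyStep (threshold : Int) (p : Int × Int) (val : Int) : Int × Int :=
  if val ≤ threshold then (max p.1 (p.2 + 1), p.2 + 1) else (p.1, 0)

def pyIsSustained (threshold : Int) (orig : List Int) (count : Int) : Bool :=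
  decide ((orig.foldl (pyStep threshold) (0, 0)).1 ≥ count)

-- the 'for threshold in unique_values: if is_sustained(...): min_sustained = threshold; break'
def pyFirst (values : List Int) (count : Int) : List Int → Option Int
  | [] => none
  | t :: ts => if pyIsSustained t values count then some t else pyFirst values count ts

def find_min_sustained_value (values : List Int) (consecutive_count : Int) : Option Int :=
  if values = [] ∨ (values.length : Int) < consecutive_count then none
  else
    let sorted_values := PySem.List.sorted values (fun x => x) false
    let unique_values := PySem.List.sorted (PySem.Set.ofList sorted_values) (fun x => x) false
    pyFirst values consecutive_count unique_values

-- ===== PORT B =====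
-- inner loop: m = values[i]; for v in values[i+1:i+k]: if v > m: m = v
def altWinMax (m : Int) : List Int → Int
  | [] => m
  | v :: vs => altWinMax (if v > m then v else m) vs

-- the loop over i = 0 .. n-k: the suffix values[i:] drives the recursion; the loop's
-- window values[i:i+k] is the suffix's head v plus vs.take (k-1); it ends when fewer
-- than k elements remain.
def altScan (k : Nat) (best : Option Int) : List Int → Option Int
  | [] => best
  | v :: vs =>
      if k ≤ vs.length + 1 then
        altScan k (some (match best with
          | none => altWinMax v (vs.take (k - 1))
          | some b => if altWinMax v (vs.take (k - 1)) < b then altWinMax v (vs.take (k - 1)) else b)) vs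
      else best

def find_min_sustained_value_alt (values : List Int) (consecutive_count : Int) : Option Int :=
  if values = [] ∨ (values.length : Int) < consecutive_count then none
  else altScan (if consecutive_count > 1 then consecutive_count.toNat else 1) none values

-- ===== PRECONDITION & SPEC =====
def Spec_find_min_sustained_value (values : List Int) (consecutive_count : Int) (out : Option Int) : Prop := out = find_min_sustained_value_alt values consecutive_count
instance (values : List Int) (consecutive_count : Int) (out : Option Int) : Decidable (Spec_find_min_sustained_value values consecutive_count out) := by unfold Spec_find_min_sustained_value; infer_instance

-- ===== CLAIM (what is proved, stated in full; the proofs are below) =====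
def Claim_equal_find_min_sustained_value : Prop := ∀ (values : List Int) (consecutive_count : Int), Dom_find_min_sustained_value values consecutive_count → Spec_find_min_sustained_value values consecutive_count (find_min_sustained_value values consecutive_count)

-- ===== LEMMAS AND PROOFS =====

-- maximal run length achievable in l when a run of current credit C is open
def runM (t : Int) (C : Int) : List Int → Int
  | [] => 0
  | v :: vs => if v ≤ t then max (C + 1) (runM t (C + 1) vs) else runM t 0 vs

-- length of the initial run of elements ≤ t
def initRun (t : Int) (l : List Int) : Int := ((l.takeWhile (fun v => decide (v ≤ t))).length : Int)

-- the window maxima B minimises over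
def wmList (k : Nat) : List Int → List Int
  | [] => []
  | v :: vs => if k ≤ vs.length + 1 then altWinMax v (vs.take (k - 1)) :: wmList k vs else []

theorem runM_cons_le {t v : Int} (vs : List Int) (C : Int) (h : v ≤ t) :
    runM t C (v :: vs) = max (C + 1) (runM t (C + 1) vs) := by simp [runM, h]

theorem runM_cons_gt {t v : Int} (vs : List Int) (C : Int) (h : ¬ v ≤ t) :
    runM t C (v :: vs) = runM t 0 vs := by simp [runM, h]

theorem initRun_nonneg (t : Int) (l : List Int) : 0 ≤ initRun t l := by
  simp [initRun]

theorem initRun_cons_le {t v : Int} (vs : List Int) (h : v ≤ t) :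
    initRun t (v :: vs) = 1 + initRun t vs := by
  simp [initRun, h]
  ring

theorem initRun_cons_gt {t v : Int} (vs : List Int) (h : ¬ v ≤ t) :
    initRun t (v :: vs) = 0 := by
  simp [initRun, h]

theorem foldl_pyStep (t : Int) (l : List Int) : ∀ (L C : Int), 0 ≤ L →
    (l.foldl (pyStep t) (L, C)).1 = max L (runM t C l) := by
  induction l with
  | nil => intro L C hL; simp [runM]; omega
  | cons v vs ih =>
      intro L C hL
      by_cases h : v ≤ t
      · rw [runM_cons_le vs C h]
        simp only [List.foldl, pyStep, if_pos h]
        rw [ih (max L (C + 1)) (C + 1) (by omega)]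
        omega
      · rw [runM_cons_gt vs C h]
        simp only [List.foldl, pyStep, if_neg h]
        exact ih L 0 hL

theorem runM_credit (t : Int) (c : Int) (hc : 1 ≤ c) : ∀ (l : List Int) (C : Int), 0 ≤ C →
    (runM t C l ≥ c ↔ (1 ≤ initRun t l ∧ C + initRun t l ≥ c) ∨ runM t 0 l ≥ c) := by
  intro l
  induction l with
  | nil => intro C hC; simp [runM, initRun]
  | cons v vs ih =>
      intro C hC
      by_cases h : v ≤ t
      · rw [runM_cons_le vs C h, runM_cons_le vs 0 h, initRun_cons_le vs h]
        have h1 := ih (C + 1) (by omega)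
        have h2 := ih 1 (by omega)
        have h0 := initRun_nonneg t vs
        rw [show (0 : Int) + 1 = 1 by norm_num]
        omega
      · rw [runM_cons_gt vs C h, runM_cons_gt vs 0 h, initRun_cons_gt vs h]
        omega

theorem runM_tails (t : Int) (c : Int) (hc : 1 ≤ c) : ∀ (l : List Int),
    (runM t 0 l ≥ c ↔ ∃ s ∈ l.tails, initRun t s ≥ c) := by
  intro l
  induction l with
  | nil =>
      constructor
      · intro hge; exfalso; simp [runM] at hge; omega
      · rintro ⟨s, hs, hsi⟩
        simp at hs
        subst hs
        simp [initRun] at hsi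
        omega
  | cons v vs ih =>
      rw [List.tails_cons]
      by_cases h : v ≤ t
      · rw [runM_cons_le vs 0 h]
        have h2 := runM_credit t c hc vs 1 (by omega)
        have h0 := initRun_nonneg t vs
        rw [show (0 : Int) + 1 = 1 by norm_num]
        constructor
        · intro hge
          rcases (by omega : (1 : Int) ≥ c ∨ runM t 1 vs ≥ c) with h1 | h1
          · exact ⟨v :: vs, by simp, by rw [initRun_cons_le vs h]; omega⟩
          · rcases h2.1 h1 with ⟨hi, hci⟩ | hr
            · exact ⟨v :: vs, by simp, by rw [initRun_cons_le vs h]; omega⟩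
            · rcases ih.1 hr with ⟨s, hs, hsi⟩
              exact ⟨s, by simp [hs], hsi⟩
        · rintro ⟨s, hs, hsi⟩
          rcases List.mem_cons.mp hs with rfl | hs'
          · rw [initRun_cons_le vs h] at hsi
            rcases (by omega : initRun t vs = 0 ∨ 1 ≤ initRun t vs) with hz | ho
            · omega
            · have := h2.2 (Or.inl ⟨ho, by omega⟩)
              omega
          · have := ih.2 ⟨s, hs', hsi⟩
            omega
      · rw [runM_cons_gt vs 0 h, ih]
        constructor
        · rintro ⟨s, hs, hsi⟩; exact ⟨s, by simp [hs], hsi⟩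
        · rintro ⟨s, hs, hsi⟩
          rcases List.mem_cons.mp hs with rfl | hs'
          · rw [initRun_cons_gt vs h] at hsi; omega
          · exact ⟨s, hs', hsi⟩

theorem initRun_ge_iff (t : Int) : ∀ (s : List Int) (k : Nat),
    (initRun t s ≥ (k : Int)) ↔ (k ≤ s.length ∧ ∀ x ∈ s.take k, x ≤ t) := by
  intro s
  induction s with
  | nil =>
      intro k
      constructor
      · intro hge
        have := initRun_nonneg t []
        simp [initRun] at hge ⊢
        omega
      · rintro ⟨h1, _⟩
        simp at h1
        simp [h1, initRun]
  | cons v vs ih =>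
      intro k
      cases k with
      | zero =>
          constructor
          · intro _; exact ⟨Nat.zero_le _, by simp⟩
          · intro _; simpa using initRun_nonneg t (v :: vs)
      | succ j =>
          by_cases h : v ≤ t
          · constructor
            · intro hge
              have hI : initRun t vs ≥ (j : Int) := by
                rw [initRun_cons_le vs h] at hge
                push_cast at hge ⊢
                omega
              obtain ⟨h1, h2⟩ := (ih j).1 hI
              refine ⟨by simp; omega, ?_⟩
              intro x hx
              rw [List.take_succ_cons] at hx
              rcases List.mem_cons.mp hx with rfl | hx'
              · exact h
              · exact h2 x hx'
            · rintro ⟨h1, h2⟩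
              have hI : initRun t vs ≥ (j : Int) := by
                apply (ih j).2
                refine ⟨by simp at h1; omega, ?_⟩
                intro x hx
                exact h2 x (by rw [List.take_succ_cons]; exact List.mem_cons_of_mem _ hx)
              rw [initRun_cons_le vs h]
              push_cast at hI ⊢
              omega
          · constructor
            · intro hge
              rw [initRun_cons_gt vs h] at hge
              exfalso
              push_cast at hge
              omega
            · rintro ⟨_, h2⟩
              exact absurd (h2 v (by rw [List.take_succ_cons]; exact List.mem_cons_self)) h

theorem altWinMax_le_iff (t : Int) : ∀ (l : List Int) (m : Int),
    (altWinMax m l ≤ t ↔ m ≤ t ∧ ∀ x ∈ l, x ≤ t) := by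
  intro l
  induction l with
  | nil => intro m; simp [altWinMax]
  | cons v vs ih =>
      intro m
      simp only [altWinMax]
      rw [ih]
      constructor
      · rintro ⟨h1, h2⟩
        by_cases h : v > m
        · rw [if_pos h] at h1
          exact ⟨by omega, fun x hx => by
            rcases List.mem_cons.mp hx with rfl | hx'
            · exact h1
            · exact h2 x hx'⟩
        · rw [if_neg h] at h1
          exact ⟨h1, fun x hx => by
            rcases List.mem_cons.mp hx with rfl | hx'
            · omega
            · exact h2 x hx'⟩
      · rintro ⟨h1, h2⟩
        have hv : v ≤ t := h2 v (by simp)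
        refine ⟨by split <;> omega, fun x hx => h2 x (by simp [hx])⟩

theorem altWinMax_mem : ∀ (l : List Int) (m : Int), altWinMax m l = m ∨ altWinMax m l ∈ l := by
  intro l
  induction l with
  | nil => intro m; simp [altWinMax]
  | cons v vs ih =>
      intro m
      simp only [altWinMax]
      by_cases h : v > m
      · rw [if_pos h]
        rcases ih v with h1 | h1
        · right; simp [h1]
        · right; simp [h1]
      · rw [if_neg h]
        rcases ih m with h1 | h1
        · left; exact h1
        · right; simp [h1]

theorem wmList_subset : ∀ (k : Nat) (l : List Int) (m : Int), m ∈ wmList k l → m ∈ l := by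
  intro k l
  induction l with
  | nil => intro m hm; simp [wmList] at hm
  | cons v vs ih =>
      intro m hm
      simp only [wmList] at hm
      split at hm
      · rcases List.mem_cons.mp hm with rfl | hm'
        · rcases altWinMax_mem (vs.take (k - 1)) v with h1 | h1
          · simp [h1]
          · right; exact List.mem_of_mem_take h1
        · right; exact ih m hm'
      · simp at hm

theorem wmList_one : ∀ (l : List Int), wmList 1 l = l := by
  intro l
  induction l with
  | nil => rfl
  | cons v vs ih => simp [wmList, altWinMax, ih]

theorem wmList_ne_nil (k : Nat) (l : List Int) (hk : 1 ≤ k) (hkl : k ≤ l.length) :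
    wmList k l ≠ [] := by
  cases l with
  | nil => simp at hkl; omega
  | cons v vs => simp only [wmList]; rw [if_pos (by simpa using hkl)]; simp

-- a window of length k all ≤ t exists iff some member of wmList is ≤ t
theorem tails_wm (t : Int) (k : Nat) (hk : 1 ≤ k) : ∀ (l : List Int),
    ((∃ s ∈ l.tails, initRun t s ≥ (k : Int)) ↔ ∃ m ∈ wmList k l, m ≤ t) := by
  intro l
  induction l with
  | nil =>
      simp only [wmList]
      constructor
      · rintro ⟨s, hs, hsi⟩
        simp at hs
        subst hs
        have := (initRun_ge_iff t [] k).1 hsi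
        simp at this
        omega
      · rintro ⟨m, hm, _⟩; simp at hm
  | cons v vs ih =>
      rw [List.tails_cons]
      simp only [wmList]
      have htk : (v :: vs).take k = v :: vs.take (k - 1) := by
        cases k with
        | zero => omega
        | succ j => simp [List.take_succ_cons]
      by_cases hlen : k ≤ vs.length + 1
      · rw [if_pos hlen]
        constructor
        · rintro ⟨s, hs, hsi⟩
          rcases List.mem_cons.mp hs with rfl | hs'
          · obtain ⟨_, hall⟩ := (initRun_ge_iff t (v :: vs) k).1 hsi
            rw [htk] at hall
            refine ⟨altWinMax v (vs.take (k - 1)), by simp, ?_⟩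
            rw [altWinMax_le_iff]
            exact ⟨hall v (by simp), fun x hx => hall x (by simp [hx])⟩
          · rcases ih.1 ⟨s, hs', hsi⟩ with ⟨m, hm, hmt⟩
            exact ⟨m, by simp [hm], hmt⟩
        · rintro ⟨m, hm, hmt⟩
          rcases List.mem_cons.mp hm with rfl | hm'
          · refine ⟨v :: vs, by simp, ?_⟩
            rw [initRun_ge_iff]
            obtain ⟨hv, hrest⟩ := (altWinMax_le_iff t (vs.take (k - 1)) v).1 hmt
            refine ⟨by simpa using hlen, ?_⟩
            rw [htk]
            intro x hx
            rcases List.mem_cons.mp hx with rfl | hx'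
            · exact hv
            · exact hrest x hx'
          · rcases ih.2 ⟨m, hm', hmt⟩ with ⟨s, hs, hsi⟩
            exact ⟨s, by simp [hs], hsi⟩
      · rw [if_neg hlen]
        constructor
        · rintro ⟨s, hs, hsi⟩
          obtain ⟨h1, _⟩ := (initRun_ge_iff t s k).1 hsi
          rcases List.mem_cons.mp hs with rfl | hs'
          · simp at h1; omega
          · have h2 := ((List.mem_tails _ _).mp hs').length_le
            omega
        · rintro ⟨m, hm, _⟩; simp at hm

-- A's sustained test, characterised through B's window maxima
theorem sustained_iff_wm (t : Int) (values : List Int) (count : Int) (k : Nat)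
    (hk : k = (if count > 1 then count.toNat else 1)) (ht : t ∈ values) :
    (pyIsSustained t values count = true ↔ ∃ m ∈ wmList k values, m ≤ t) := by
  have hfold : ((values.foldl (pyStep t) (0, 0)).1 : Int) = max 0 (runM t 0 values) :=
    foldl_pyStep t values 0 0 (by omega)
  by_cases hc : count ≥ 1
  · have hkc : (k : Int) = count := by
      rcases (by omega : count = 1 ∨ count > 1) with h1 | h1
      · simp [hk, h1]
      · rw [hk, if_pos h1]; omega
    have hk1 : 1 ≤ k := by omega
    constructor
    · intro hs
      have hge : (values.foldl (pyStep t) (0, 0)).1 ≥ count := by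
        simpa [pyIsSustained] using hs
      rw [hfold] at hge
      have hr : runM t 0 values ≥ count := by omega
      have hex := (runM_tails t count hc values).1 hr
      rw [← hkc] at hex
      exact (tails_wm t k hk1 values).1 hex
    · intro hex
      have hex2 := (tails_wm t k hk1 values).2 hex
      rw [hkc] at hex2
      have hr := (runM_tails t count hc values).2 hex2
      simp only [pyIsSustained, decide_eq_true_eq, ge_iff_le]
      rw [hfold]
      omega
  · -- count ≤ 0: sustained is trivially true, and k = 1, wmList 1 values = values ∋ t
    have hk1 : k = 1 := by rw [hk, if_neg (by omega)]
    constructor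
    · intro _
      exact ⟨t, by rw [hk1, wmList_one]; exact ht, le_refl t⟩
    · intro _
      simp only [pyIsSustained, decide_eq_true_eq, ge_iff_le]
      rw [hfold]
      omega

-- B's scan, characterised: fold of min over wmList
theorem altScan_eq (k : Nat) : ∀ (l : List Int) (best : Option Int),
    altScan k best l = (wmList k l).foldl (fun b m => some (match b with
      | none => m
      | some b' => if m < b' then m else b')) best := by
  intro l
  induction l with
  | nil => intro best; simp [altScan, wmList]
  | cons v vs ih =>
      intro best
      simp only [altScan, wmList]
      by_cases h : k ≤ vs.length + 1
      · rw [if_pos h, if_pos h]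
        simp only [List.foldl]
        exact ih _
      · rw [if_neg h, if_neg h]
        rfl

theorem foldl_step_some (ms : List Int) : ∀ (b : Int),
    (ms.foldl (fun b m => some (match b with
      | none => m
      | some b' => if m < b' then m else b')) (some b)) = some (ms.foldl min b) := by
  induction ms with
  | nil => intro b; rfl
  | cons m ms ih =>
      intro b
      simp only [List.foldl]
      rw [ih]
      congr 1
      by_cases h : m < b
      · rw [if_pos h, min_eq_right (le_of_lt h)]
      · rw [if_neg h, min_eq_left (not_lt.mp h)]

theorem foldl_min_mem : ∀ (ms : List Int) (b : Int), ms.foldl min b = b ∨ ms.foldl min b ∈ ms := by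
  intro ms
  induction ms with
  | nil => intro b; left; rfl
  | cons m ms ih =>
      intro b
      simp only [List.foldl]
      rcases ih (min b m) with h | h
      · rcases le_total b m with h1 | h1
        · left; rw [h, min_eq_left h1]
        · right; rw [h, min_eq_right h1]; exact List.mem_cons_self
      · right; exact List.mem_cons_of_mem _ h

theorem foldl_min_le : ∀ (ms : List Int) (b : Int),
    ms.foldl min b ≤ b ∧ ∀ m ∈ ms, ms.foldl min b ≤ m := by
  intro ms
  induction ms with
  | nil => intro b; simp
  | cons m ms ih =>
      intro b
      obtain ⟨h1, h2⟩ := ih (min b m)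
      simp only [List.foldl]
      refine ⟨le_trans h1 (min_le_left _ _), ?_⟩
      intro x hx
      rcases List.mem_cons.mp hx with rfl | hx'
      · exact le_trans h1 (min_le_right _ _)
      · exact h2 x hx'

-- first element of a sorted list satisfying the test is its least satisfier
theorem pyFirst_sorted (values : List Int) (count : Int) : ∀ (U : List Int),
    U.Pairwise (· ≤ ·) → ∀ t₀, t₀ ∈ U → pyIsSustained t₀ values count = true →
    (∀ t ∈ U, pyIsSustained t values count = true → t₀ ≤ t) →
    pyFirst values count U = some t₀ := by
  intro U
  induction U with
  | nil => intro _ t₀ h; simp at h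
  | cons h us ih =>
      intro hpw t₀ ht₀ hP hmin
      simp only [pyFirst]
      by_cases hPh : pyIsSustained h values count = true
      · rw [if_pos hPh]
        have h1 : t₀ ≤ h := hmin h (by simp) hPh
        have h2 : h ≤ t₀ := by
          rcases List.mem_cons.mp ht₀ with rfl | h3
          · exact le_refl _
          · exact (List.pairwise_cons.mp hpw).1 t₀ h3
        have heq : h = t₀ := by omega
        rw [heq]
      · rw [if_neg hPh]
        have ht₀' : t₀ ∈ us := by
          rcases List.mem_cons.mp ht₀ with rfl | h3
          · exact absurd hP hPh
          · exact h3
        exact ih (List.pairwise_cons.mp hpw).2 t₀ ht₀' hP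
          (fun t htu hPt => hmin t (by simp [htu]) hPt)

-- ===== VERDICT (by name: the statement is the Claim_ definition above) =====
theorem find_min_sustained_value_spec : Claim_equal_find_min_sustained_value := by
  intro values count _
  unfold Spec_find_min_sustained_value
  by_cases hg : values = [] ∨ (values.length : Int) < count
  · simp [find_min_sustained_value, find_min_sustained_value_alt, hg]
  · push_neg at hg
    obtain ⟨hne, hlen⟩ := hg
    set k : Nat := if count > 1 then count.toNat else 1 with hk
    have hk1 : 1 ≤ k := by
      by_cases h : count > 1 <;> simp [hk, h] <;> omega
    have hlen1 : 1 ≤ values.length := by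
      cases values with
      | nil => exact absurd rfl hne
      | cons _ _ => simp
    have hkl : k ≤ values.length := by
      by_cases h : count > 1
      · simp only [hk, if_pos h]; omega
      · simp only [hk, if_neg h]; omega
    -- B's value: the minimum of the window maxima
    obtain ⟨m₀, rest, hW⟩ : ∃ m₀ rest, wmList k values = m₀ :: rest := by
      cases hW : wmList k values with
      | nil => exact absurd hW (wmList_ne_nil k values hk1 hkl)
      | cons a b => exact ⟨a, b, rfl⟩
    set t₀ : Int := rest.foldl min m₀ with ht₀
    have hB : find_min_sustained_value_alt values count = some t₀ := by
      simp only [find_min_sustained_value_alt]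
      rw [if_neg (by push_neg; exact ⟨hne, hlen⟩)]
      rw [← hk, altScan_eq, hW]
      simp only [List.foldl]
      exact foldl_step_some rest m₀
    -- t₀ is in wmList, hence in values
    have ht₀W : t₀ ∈ wmList k values := by
      rw [hW]
      rcases foldl_min_mem rest m₀ with h | h
      · simp [ht₀, h]
      · simp [ht₀, h]
    have ht₀v : t₀ ∈ values := wmList_subset k values t₀ ht₀W
    -- t₀ is ≤ every member of wmList
    have ht₀le : ∀ m ∈ wmList k values, t₀ ≤ m := by
      intro m hm
      rw [hW] at hm
      rcases (by simpa using hm : m = m₀ ∨ m ∈ rest) with rfl | hm'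
      · exact (foldl_min_le rest m).1
      · exact (foldl_min_le rest m₀).2 m hm'
    -- the unique sorted candidate list
    set U : List Int := PySem.List.sorted (PySem.Set.ofList (PySem.List.sorted values (fun x => x) false)) (fun x => x) false with hU
    have hUpw : U.Pairwise (· ≤ ·) :=
      (PySem.List.sorted_ofList_pairwise_lt _).imp (fun h => le_of_lt h)
    have hUmem : ∀ x, x ∈ U ↔ x ∈ values := by
      intro x
      rw [hU, PySem.List.mem_sorted, PySem.Set.mem_ofList, PySem.List.mem_sorted]
    have hA : find_min_sustained_value values count = pyFirst values count U := by
      simp only [find_min_sustained_value]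
      rw [if_neg (by push_neg; exact ⟨hne, hlen⟩)]
    rw [hA, hB]
    apply pyFirst_sorted values count U hUpw t₀ ((hUmem t₀).2 ht₀v)
    · exact (sustained_iff_wm t₀ values count k hk ht₀v).2 ⟨t₀, ht₀W, le_refl t₀⟩
    · intro t htU hPt
      have htv : t ∈ values := (hUmem t).1 htU
      obtain ⟨m, hm, hmt⟩ := (sustained_iff_wm t values count k hk htv).1 hPt
      exact le_trans (ht₀le m hm) hmt
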